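-- pv_equiv track=rewrite | github.com/QWERasd12345-ASD/PE5Class | code/generate_fcgr.py | extract_sequence_id
-- ===== SOURCE A (Python) =====
-- def extract_sequence_id(header):
--     """
--     从FASTA序列头部提取序列ID
--
--     参数：
--     header: FASTA序列头部字符串（不含'>'）
--
--     返回：
--     sequence_id: 提取的序列ID（格式：accession_numerical1_numerical2）
--     """
--     parts = header.split()
--     if not parts:
--         return ""
--
--     sequence_id = parts[0]
--     numerical_values = []
--
--     # 从后向前查找两个数值
--     for part in reversed(parts):
--         if part.isdigit():
--             numerical_values.insert(0, part)
--             if len(numerical_values) == 2: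
--                 break
--
--     # 如果找到两个数值，添加到序列ID后面
--     if numerical_values:
--         sequence_id = f"{sequence_id}_{'_'.join(numerical_values)}"
--
--     return sequence_id
-- ===== SOURCE B (Python) =====
-- def extract_sequence_id(header):
--     # One forward pass: collect all digit tokens, then slice the last two.
--     parts = header.split()
--     if not parts:
--         return ""
--     nums = [p for p in parts if p.isdigit()]
--     last2 = nums[-2:]
--     if last2:
--         return "_".join([parts[0]] + last2)
--     return parts[0]
-- ===== Notes on version B (the rewrite author's own statement) =====
-- stated objective: simpler
-- what changed: Replaces A's backward scan with early break and insert(0,...) accumulation by a forward filter of all digit tokens followed by a tail slice nums[-2:] and a single join.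
import Mathlib
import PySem

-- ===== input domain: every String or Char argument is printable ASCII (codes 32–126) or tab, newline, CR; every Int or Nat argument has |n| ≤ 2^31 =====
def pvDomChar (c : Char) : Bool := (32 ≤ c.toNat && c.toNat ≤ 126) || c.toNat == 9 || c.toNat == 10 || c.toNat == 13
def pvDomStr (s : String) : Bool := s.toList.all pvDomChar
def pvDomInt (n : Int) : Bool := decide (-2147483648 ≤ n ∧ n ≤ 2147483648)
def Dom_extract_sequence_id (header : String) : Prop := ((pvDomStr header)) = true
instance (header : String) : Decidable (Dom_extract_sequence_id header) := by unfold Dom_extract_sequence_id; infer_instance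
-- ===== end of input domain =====

-- B replaces A's backward scan with early break and insert(0,...) by a forward
-- filter of all digit tokens plus a tail slice nums[-2:] (objective: simpler).


-- ===== PORT A =====
-- the 'for part in reversed(parts)' loop with its early break; acc is numerical_values
def pvCollect (l : List String) (acc : List String) : List String :=
  match l with
  | [] => acc
  | p :: rest =>
    if PySem.Str.strIsdigit p then
      let acc' := p :: acc            -- numerical_values.insert(0, part)
      if acc'.length = 2 then acc'    -- break
      else pvCollect rest acc'
    else pvCollect rest acc

def extract_sequence_id (header : String) : String :=
  let parts := PySem.Str.split₀ header
  if parts = [] then ""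
  else
    let sequence_id := parts.headD ""           -- parts[0], parts nonempty
    let numerical_values := pvCollect parts.reverse []
    -- f"{sequence_id}_{'_'.join(numerical_values)}" ported as '_'.join of the cons list (exact)
    if numerical_values = [] then sequence_id
    else PySem.Str.join "_" (sequence_id :: numerical_values)

-- ===== PORT B =====
def extract_sequence_id_alt (header : String) : String :=
  let parts := PySem.Str.split₀ header
  if parts = [] then ""
  else
    let nums := parts.filter (fun p => PySem.Str.strIsdigit p)
    let last2 := PySem.List.slice nums (some (-2)) none   -- nums[-2:]
    if last2 = [] then parts.headD ""
    else PySem.Str.join "_" (parts.headD "" :: last2)     -- '_'.join([parts[0]] + last2)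

-- ===== PRECONDITION & SPEC =====
def Spec_extract_sequence_id (header : String) (out : String) : Prop := out = extract_sequence_id_alt header
instance (header : String) (out : String) : Decidable (Spec_extract_sequence_id header out) := by unfold Spec_extract_sequence_id; infer_instance

-- ===== CLAIM (what is proved, stated in full; the proofs are below) =====
def Claim_equal_extract_sequence_id : Prop := ∀ (header : String), Dom_extract_sequence_id header → Spec_extract_sequence_id header (extract_sequence_id header)

-- ===== LEMMAS AND PROOFS =====
lemma pvCollect_eq (l : List String) (acc : List String) (h : acc.length ≤ 1) :
    pvCollect l acc
      = ((l.filter (fun p => PySem.Str.strIsdigit p)).take (2 - acc.length)).reverse ++ acc := by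
  induction l generalizing acc with
  | nil => simp [pvCollect]
  | cons p rest ih =>
    by_cases hd : PySem.Chars.strIsdigit p.toList = true
    · by_cases h2 : acc.length = 1
      · obtain ⟨a, rest', rfl⟩ : ∃ a rest', acc = a :: rest' := by
          cases acc with
          | nil => simp at h2
          | cons a t => exact ⟨a, t, rfl⟩
        simp [pvCollect, PySem.Str.strIsdigit, hd, h2]
      · have h0 : acc = [] := List.eq_nil_of_length_eq_zero (by omega)
        subst h0
        have hstep : pvCollect (p :: rest) [] = pvCollect rest [p] := by
          simp [pvCollect, PySem.Str.strIsdigit, hd]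
        rw [hstep, ih [p] (by simp)]
        simp [PySem.Str.strIsdigit, hd, List.take]
    · have hstep : pvCollect (p :: rest) acc = pvCollect rest acc := by
        simp [pvCollect, PySem.Str.strIsdigit, hd]
      rw [hstep, ih acc h]
      simp [PySem.Str.strIsdigit, hd]

lemma pvCollect_eq_tail (parts : List String) :
    pvCollect parts.reverse []
      = (parts.filter (fun p => PySem.Str.strIsdigit p)).drop
          ((parts.filter (fun p => PySem.Str.strIsdigit p)).length - 2) := by
  rw [pvCollect_eq parts.reverse [] (by simp)]
  simp [List.filter_reverse, List.take_reverse]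

-- ===== VERDICT (by name: the statement is the Claim_ definition above) =====
theorem extract_sequence_id_spec : Claim_equal_extract_sequence_id := by
  intro header _
  unfold Spec_extract_sequence_id extract_sequence_id extract_sequence_id_alt
  by_cases hp : PySem.Str.split₀ header = []
  · simp [hp]
  · simp only [hp, if_false]
    rw [pvCollect_eq_tail,
        PySem.List.slice_from_neg_ofNat _ 2 (by omega)]
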